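-- pv_equiv track=rewrite | github.com/rcdailey/dotfiles | scripts/research/research/_render.py | apply_find
-- ===== SOURCE A (Python) =====
-- def apply_find(text: str, pattern: str, context: int) -> str:
--     """Return paragraphs matching pattern with context paragraphs around them."""
--     paragraphs = text.split("\n\n")
--     needle = pattern.lower()
--     keep: set[int] = set()
--     for i, para in enumerate(paragraphs):
--         if needle in para.lower():
--             lo = max(0, i - context)
--             hi = min(len(paragraphs), i + context + 1)
--             keep.update(range(lo, hi))
--     if not keep:
--         return f"[no paragraphs matched '{pattern}']"
--     return "\n\n".join(paragraphs[i] for i in sorted(keep))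
-- ===== SOURCE B (Python) =====
-- def apply_find(text: str, pattern: str, context: int) -> str:
--     """Return paragraphs matching pattern with context paragraphs around them."""
--     paragraphs = text.split("\n\n")
--     needle = pattern.lower()
--     matched = [needle in p.lower() for p in paragraphs]
--     kept = [
--         p
--         for j, p in enumerate(paragraphs)
--         if any(matched[i] for i in range(max(0, j - context), min(len(paragraphs), j + context + 1)))
--     ]
--     if not kept:
--         return f"[no paragraphs matched '{pattern}']"
--     return "\n\n".join(kept)
-- ===== Notes on version B (the rewrite author's own statement) =====
-- stated objective: alternative
-- what changed: Instead of scattering each match's context window into a set of indices and sorting it, B precomputes a match-flag list and does one gather pass that keeps paragraph j iff any flag in its clamped window [j-context, j+context] is set, so the set and the sort disappear.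
import Mathlib
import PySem

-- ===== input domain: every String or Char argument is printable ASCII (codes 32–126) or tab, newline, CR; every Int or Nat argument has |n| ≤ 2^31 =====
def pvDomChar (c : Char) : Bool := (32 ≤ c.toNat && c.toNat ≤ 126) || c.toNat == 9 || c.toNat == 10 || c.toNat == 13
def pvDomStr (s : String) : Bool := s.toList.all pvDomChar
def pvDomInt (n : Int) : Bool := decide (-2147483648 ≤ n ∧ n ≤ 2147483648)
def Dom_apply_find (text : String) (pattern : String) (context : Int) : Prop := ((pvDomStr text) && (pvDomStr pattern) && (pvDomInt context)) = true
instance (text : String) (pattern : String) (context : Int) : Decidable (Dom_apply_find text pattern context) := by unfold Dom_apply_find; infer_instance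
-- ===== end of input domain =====

-- B replaces A's scatter-into-a-set-then-sort bookkeeping by a match-flag list and a single
-- gather pass keeping each paragraph whose clamped window contains a flag (alternative decomposition).

-- ===== PORT A =====
def apply_find (text : String) (pattern : String) (context : Int) : String :=
  let paragraphs := (PySem.Str.split? text "\n\n").getD []
  let needle := PySem.Str.lower pattern
  let keep : PySem.Set Int :=
    (PySem.List.enumerate paragraphs 0).foldl
      (fun keep ip =>
        if PySem.Str.isIn needle (PySem.Str.lower ip.2) then
          PySem.Set.update keep
            (PySem.List.pyRange (max 0 (ip.1 - context))
              (min (paragraphs.length : Int) (ip.1 + context + 1)) 1)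
        else keep)
      PySem.Set.empty
  if keep = [] then "[no paragraphs matched '" ++ pattern ++ "']"
  else
    PySem.Str.join "\n\n"
      ((PySem.List.sorted keep (fun x => x) false).map
        (fun i => PySem.List.pyGetD paragraphs i ""))

-- ===== PORT B =====
def apply_find_alt (text : String) (pattern : String) (context : Int) : String :=
  let paragraphs := (PySem.Str.split? text "\n\n").getD []
  let needle := PySem.Str.lower pattern
  let matched := paragraphs.map (fun p => PySem.Str.isIn needle (PySem.Str.lower p))
  let kept :=
    ((PySem.List.enumerate paragraphs 0).filter
      (fun jp =>
        (PySem.List.pyRange (max 0 (jp.1 - context))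
          (min (paragraphs.length : Int) (jp.1 + context + 1)) 1).any
          (fun i => PySem.List.pyGetD matched i false))).map (fun jp => jp.2)
  if kept = [] then "[no paragraphs matched '" ++ pattern ++ "']"
  else PySem.Str.join "\n\n" kept

-- ===== PRECONDITION & SPEC =====
def Spec_apply_find (text : String) (pattern : String) (context : Int) (out : String) : Prop := out = apply_find_alt text pattern context
instance (text : String) (pattern : String) (context : Int) (out : String) : Decidable (Spec_apply_find text pattern context out) := by unfold Spec_apply_find; infer_instance

-- ===== CLAIM (what is proved, stated in full; the proofs are below) =====
def Claim_equal_apply_find : Prop := ∀ (text : String) (pattern : String) (context : Int), Dom_apply_find text pattern context → Spec_apply_find text pattern context (apply_find text pattern context)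

-- ===== LEMMAS AND PROOFS =====

-- membership in A's set-accumulating fold
theorem mem_foldl_update {β : Type} (l : List β) (c : β → Bool) (r : β → List Int)
    (s₀ : PySem.Set Int) (y : Int) :
    (y ∈ l.foldl (fun s x => if c x then PySem.Set.update s (r x) else s) s₀) ↔
      (y ∈ s₀ ∨ ∃ x ∈ l, c x ∧ y ∈ r x) := by
  induction l generalizing s₀ with
  | nil => simp
  | cons a t ih =>
    simp only [List.foldl_cons]
    by_cases h : c a = true
    · simp only [h, if_true, ih, PySem.Set.mem_update, List.mem_cons]
      aesop
    · simp only [h, Bool.false_eq_true, if_false, ih, List.mem_cons]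
      aesop

theorem nodup_foldl_update {β : Type} (l : List β) (c : β → Bool) (r : β → List Int)
    (s₀ : PySem.Set Int) (h : s₀.Nodup) :
    (l.foldl (fun s x => if c x then PySem.Set.update s (r x) else s) s₀).Nodup := by
  induction l generalizing s₀ with
  | nil => exact h
  | cons a t ih =>
    simp only [List.foldl_cons]
    by_cases hc : c a = true
    · simp only [hc, if_true]
      exact ih _ (PySem.Set.nodup_update _ _ h)
    · simp only [hc, Bool.false_eq_true, if_false]
      exact ih _ h

theorem apply_find_spec_aux : ∀ (text pattern : String) (context : Int),
    apply_find text pattern context = apply_find_alt text pattern context := by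
  intro text pattern context
  unfold apply_find apply_find_alt
  set xs := (PySem.Str.split? text "\n\n").getD [] with hxs
  set needle := PySem.Str.lower pattern with hneedle
  set flag : String → Bool := fun p => PySem.Str.isIn needle (PySem.Str.lower p) with hflag
  set n : Int := (xs.length : Int) with hn
  set keep : PySem.Set Int :=
    (PySem.List.enumerate xs 0).foldl
      (fun keep ip => if flag ip.2 then
        PySem.Set.update keep (PySem.List.pyRange (max 0 (ip.1 - context)) (min n (ip.1 + context + 1)) 1)
        else keep) PySem.Set.empty with hkeep
  set matched := xs.map flag with hmatched
  set W : Int → Bool := fun j =>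
    (PySem.List.pyRange (max 0 (j - context)) (min n (j + context + 1)) 1).any
      (fun i => PySem.List.pyGetD matched i false) with hW
  set filtered := (PySem.List.enumerate xs 0).filter (fun jp => W jp.1) with hfiltered
  -- characterize membership of keep
  have hmem : ∀ j : Int, j ∈ keep ↔
      ∃ k : Nat, ∃ hk : k < xs.length, flag xs[k] ∧ (k : Int) - context ≤ j ∧ j ≤ (k : Int) + context ∧ 0 ≤ j ∧ j < n := by
    intro j
    rw [hkeep, mem_foldl_update]
    constructor
    · rintro (h | ⟨ip, hip, hc, hr⟩)
      · simp [PySem.Set.empty] at h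
      · obtain ⟨k, hk, rfl⟩ := (PySem.List.mem_enumerate_iff _ _ _).1 hip
        rw [PySem.List.mem_pyRange_one] at hr
        exact ⟨k, hk, hc, by omega, by omega, by omega, by omega⟩
    · rintro ⟨k, hk, hc, h1, h2, h3, h4⟩
      refine Or.inr ⟨((k : Int), xs[k]), ?_, hc, ?_⟩
      · exact (PySem.List.mem_enumerate_iff _ _ _).2 ⟨k, hk, by simp⟩
      · rw [PySem.List.mem_pyRange_one]
        constructor <;> omega
  -- characterize W on in-range indices
  have hWc : ∀ j : Int, 0 ≤ j → j < n → (W j = true ↔ j ∈ keep) := by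
    intro j hj0 hjn
    rw [hW]
    simp only [List.any_eq_true, PySem.List.mem_pyRange_one]
    rw [hmem]
    constructor
    · rintro ⟨i, ⟨hlo, hhi⟩, hget⟩
      have hi0 : 0 ≤ i := by omega
      have hin : i < (xs.length : Int) := by omega
      lift i to Nat using hi0 with k
      have hk : k < xs.length := by exact_mod_cast hin
      rw [hmatched, PySem.List.pyGetD_natCast, List.getD_eq_getElem?_getD] at hget
      rw [List.getElem?_eq_getElem (by simpa using hk)] at hget
      simp at hget
      exact ⟨k, hk, hget, by omega, by omega, hj0, hjn⟩
    · rintro ⟨k, hk, hc, h1, h2, h3, h4⟩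
      refine ⟨(k : Int), ⟨by omega, by omega⟩, ?_⟩
      rw [hmatched, PySem.List.pyGetD_natCast, List.getD_eq_getElem?_getD]
      rw [List.getElem?_eq_getElem (by simpa using hk)]
      simpa using hc
  -- keep indices lie in [0, n)
  have hrange : ∀ j ∈ keep, 0 ≤ j ∧ j < n := by
    intro j hj; obtain ⟨_, _, _, _, _, h3, h4⟩ := (hmem j).1 hj; exact ⟨h3, h4⟩
  -- the kept-index list
  set K := filtered.map (fun jp => jp.1) with hK
  have hKpair : K.Pairwise (· < ·) := by
    rw [hK, List.pairwise_map]
    exact (PySem.List.pairwise_lt_enumerate xs 0).sublist List.filter_sublist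
  have hKmem : ∀ j : Int, j ∈ K ↔ j ∈ keep := by
    intro j
    rw [hK, hfiltered]
    simp only [List.mem_map, List.mem_filter]
    constructor
    · rintro ⟨ip, ⟨hip, hw⟩, rfl⟩
      obtain ⟨k, hk, rfl⟩ := (PySem.List.mem_enumerate_iff _ _ _).1 hip
      exact (hWc _ (by simp) (by rw [hn]; push_cast; omega)).1 (by simpa using hw)
    · intro hj
      obtain ⟨hj0, hjn⟩ := hrange j hj
      lift j to Nat using hj0 with k
      have hk : k < xs.length := by omega
      refine ⟨((k : Int), xs[k]), ⟨?_, ?_⟩, rfl⟩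
      · exact (PySem.List.mem_enumerate_iff _ _ _).2 ⟨k, hk, by simp⟩
      · simpa using (hWc _ (by simp) hjn).2 hj
  have hKnodup : K.Nodup := hKpair.imp (fun h => ne_of_lt h)
  have hknodup : keep.Nodup := nodup_foldl_update _ _ _ _ (by simp [PySem.Set.empty])
  have hperm : K.Perm keep := (List.perm_ext_iff_of_nodup hKnodup hknodup).2 hKmem
  have hsorted : PySem.List.sorted keep (fun x => x) false = K :=
    PySem.List.sorted_eq_of_perm_of_pairwise_lt keep K (fun x => x) hperm hKpair
  -- the two mapped lists coincide
  have hmap : K.map (fun i => PySem.List.pyGetD xs i "") = filtered.map (fun jp => jp.2) := by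
    rw [hK, List.map_map]
    refine List.map_congr_left ?_
    intro ip hip
    rw [hfiltered, List.mem_filter] at hip
    have hip' : ip ∈ PySem.List.enumerate xs 0 := hip.1
    obtain ⟨k, hk, rfl⟩ := (PySem.List.mem_enumerate_iff _ _ _).1 hip'
    simp [PySem.List.pyGetD_natCast, List.getD_eq_getElem?_getD,
      List.getElem?_eq_getElem (by simpa using hk : k < xs.length)]
  -- emptiness agreement
  have hempty : (keep = []) ↔ (filtered.map (fun jp => jp.2) = []) := by
    rw [List.map_eq_nil_iff]
    constructor
    · intro h
      rcases List.eq_nil_or_concat filtered with h' | ⟨l, a, h'⟩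
      · exact h'
      · exfalso
        have : a.1 ∈ K := by rw [hK, h']; simp
        rw [hKmem, h] at this; simp at this
    · intro h
      rcases List.eq_nil_or_concat keep with h' | ⟨l, a, h'⟩
      · exact h'
      · exfalso
        have : a ∈ keep := by rw [h']; simp
        rw [← hKmem, hK, h] at this; simp at this
  by_cases h : keep = []
  · rw [if_pos h, if_pos (hempty.1 h)]
  · rw [if_neg h, if_neg (fun hc => h (hempty.2 hc)), hsorted, hmap]

-- ===== VERDICT (by name: the statement is the Claim_ definition above) =====
theorem apply_find_spec : Claim_equal_apply_find := by
  intro text pattern context _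
  exact apply_find_spec_aux text pattern context
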